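-- pv_equiv track=rewrite | github.com/himanshusinghbisen/DataMining | clean_notebook_whitespace.py | clean_source_lines
-- ===== SOURCE A (Python) =====
-- def clean_source_lines(lines, max_blank_lines=1):
--     cleaned = []
--     blank_count = 0
--     for line in lines:
--         # Remove trailing spaces
--         stripped = line.rstrip()
--         if stripped == "":
--             blank_count += 1
--             if blank_count <= max_blank_lines:
--                 cleaned.append("")
--         else:
--             blank_count = 0
--             cleaned.append(stripped)
--     # Keep newline endings in notebook format
--     return [l + "\n" for l in cleaned]
-- ===== SOURCE B (Python) =====
-- def clean_source_lines(lines, max_blank_lines=1):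
--     # Run-based rewrite: strip everything first, then walk runs of blank lines,
--     # emitting a clamped number of blanks per run instead of keeping a counter.
--     stripped = [l.rstrip() for l in lines]
--     out = []
--     i = 0
--     n = len(stripped)
--     while i < n:
--         if stripped[i] == "":
--             j = i
--             while j < n and stripped[j] == "":
--                 j += 1
--             out.extend([""] * max(0, min(j - i, max_blank_lines)))
--             i = j
--         else:
--             out.append(stripped[i])
--             i += 1
--     return [l + "\n" for l in out]
-- ===== Notes on version B (the rewrite author's own statement) =====
-- stated objective: alternative
-- what changed: Replaces the per-line blank counter with a two-phase run walk: strip all lines first, then for each run of consecutive blank lines emit max(0, min(run length, max_blank_lines)) empty lines at once.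
import Mathlib
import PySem

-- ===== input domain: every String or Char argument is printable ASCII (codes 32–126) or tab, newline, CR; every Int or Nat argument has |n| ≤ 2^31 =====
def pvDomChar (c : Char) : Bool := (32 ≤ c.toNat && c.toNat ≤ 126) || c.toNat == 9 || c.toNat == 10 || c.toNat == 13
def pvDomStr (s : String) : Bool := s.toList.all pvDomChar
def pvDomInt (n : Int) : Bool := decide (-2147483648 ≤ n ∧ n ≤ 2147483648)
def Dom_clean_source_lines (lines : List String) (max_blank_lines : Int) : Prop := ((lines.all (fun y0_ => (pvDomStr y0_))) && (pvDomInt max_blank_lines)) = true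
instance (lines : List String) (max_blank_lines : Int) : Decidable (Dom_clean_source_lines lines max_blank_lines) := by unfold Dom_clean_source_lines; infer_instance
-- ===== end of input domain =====

-- B replaces A's per-line blank counter with a two-phase run walk (strip all, then emit a
-- clamped number of blanks per run of blank lines); same cost, different decomposition.

-- ===== PORT A =====
-- the for-loop of A, state = (cleaned, blank_count)
def cslGoA (mbl : Int) (cleaned : List String) (bc : Int) : List String → List String × Int
  | [] => (cleaned, bc)
  | line :: rest =>
    let stripped := PySem.Str.rstrip line
    if stripped = "" then
      cslGoA mbl (if bc + 1 ≤ mbl then cleaned ++ [""] else cleaned) (bc + 1) rest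
    else
      cslGoA mbl (cleaned ++ [stripped]) 0 rest

def clean_source_lines (lines : List String) (max_blank_lines : Int) : List String :=
  (cslGoA max_blank_lines [] 0 lines).1.map (· ++ "\n")

-- ===== PORT B =====
-- Source B's while loop over the stripped list: a run of blanks is consumed at once
def cslRuns (mbl : Int) : List String → List String
  | [] => []
  | s :: rest =>
    if s = "" then
      let run := rest.takeWhile (· == "")
      List.replicate (max 0 (min ((1 + run.length : Nat) : Int) mbl)).toNat ""
        ++ cslRuns mbl (rest.dropWhile (· == ""))
    else
      s :: cslRuns mbl rest
termination_by l => l.length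
decreasing_by
  · exact Nat.lt_succ_of_le (List.length_dropWhile_le _ _)
  · simp

def clean_source_lines_alt (lines : List String) (max_blank_lines : Int) : List String :=
  (cslRuns max_blank_lines (lines.map PySem.Str.rstrip)).map (· ++ "\n")

-- ===== PRECONDITION & SPEC =====
def Spec_clean_source_lines (lines : List String) (max_blank_lines : Int) (out : List String) : Prop := out = clean_source_lines_alt lines max_blank_lines
instance (lines : List String) (max_blank_lines : Int) (out : List String) : Decidable (Spec_clean_source_lines lines max_blank_lines out) := by unfold Spec_clean_source_lines; infer_instance

-- ===== CLAIM (what is proved, stated in full; the proofs are below) =====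
def Claim_equal_clean_source_lines : Prop := ∀ (lines : List String) (max_blank_lines : Int), Dom_clean_source_lines lines max_blank_lines → Spec_clean_source_lines lines max_blank_lines (clean_source_lines lines max_blank_lines)

-- ===== LEMMAS AND PROOFS =====

-- proof-side version of A's loop running over already-stripped lines
def cslGoS (mbl : Int) (cleaned : List String) (bc : Int) : List String → List String × Int
  | [] => (cleaned, bc)
  | s :: rest =>
    if s = "" then
      cslGoS mbl (if bc + 1 ≤ mbl then cleaned ++ [""] else cleaned) (bc + 1) rest
    else
      cslGoS mbl (cleaned ++ [s]) 0 rest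

theorem cslGoA_eq_goS (mbl : Int) (c : List String) (bc : Int) (ls : List String) :
    cslGoA mbl c bc ls = cslGoS mbl c bc (ls.map PySem.Str.rstrip) := by
  induction ls generalizing c bc with
  | nil => rfl
  | cons l rest ih => simp only [cslGoA, cslGoS, List.map_cons]; split_ifs <;> exact ih _ _

theorem cslGoS_acc (mbl : Int) (c : List String) (bc : Int) (ls : List String) :
    cslGoS mbl c bc ls = (c ++ (cslGoS mbl [] bc ls).1, (cslGoS mbl [] bc ls).2) := by
  induction ls generalizing c bc with
  | nil => simp [cslGoS]
  | cons s rest ih =>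
    simp only [cslGoS]
    split_ifs with hs hb
    · rw [ih (c ++ [""]), ih ([] ++ [""])]; simp
    · rw [ih c]
    · rw [ih (c ++ [s]), ih ([] ++ [s])]; simp

theorem cslGoS_append (mbl : Int) (c : List String) (bc : Int) (xs ys : List String) :
    cslGoS mbl c bc (xs ++ ys)
      = cslGoS mbl (cslGoS mbl c bc xs).1 (cslGoS mbl c bc xs).2 ys := by
  induction xs generalizing c bc with
  | nil => rfl
  | cons x xs ih => simp only [cslGoS, List.cons_append]; split_ifs <;> exact ih _ _

theorem cslGoS_blanks (mbl : Int) (k : Nat) (bc : Int) :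
    cslGoS mbl [] bc (List.replicate k "")
      = (List.replicate (min (k : Int) (mbl - bc)).toNat "", bc + k) := by
  induction k generalizing bc with
  | zero => simp [cslGoS]
  | succ k ih =>
    rw [List.replicate_succ]
    simp only [cslGoS]
    rw [if_pos trivial, cslGoS_acc, ih (bc + 1)]
    have h2 : bc + 1 + (k : Int) = bc + ((k + 1 : Nat) : Int) := by push_cast; ring
    simp only [Prod.mk.injEq]
    split_ifs with hb
    · have hm : (min ((k + 1 : Nat) : Int) (mbl - bc)).toNat
          = (min ((k : Int)) (mbl - (bc + 1))).toNat + 1 := by omega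
      rw [hm, List.replicate_succ]
      exact ⟨by simp, h2⟩
    · have h0 : (min ((k : Int)) (mbl - (bc + 1))).toNat = 0 := by omega
      have h1 : (min ((k + 1 : Nat) : Int) (mbl - bc)).toNat = 0 := by omega
      rw [h0, h1]
      exact ⟨by simp, h2⟩

theorem cslGoS_reset (mbl : Int) (bc : Int) (ls : List String)
    (h : ∀ x ∈ ls.head?, x ≠ "") :
    (cslGoS mbl [] bc ls).1 = (cslGoS mbl [] 0 ls).1 := by
  cases ls with
  | nil => rfl
  | cons s rest =>
    have hs : s ≠ "" := h s rfl
    simp only [cslGoS, if_neg hs]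

theorem dropWhile_head_ne (l : List String) : ∀ x ∈ (l.dropWhile (· == "")).head?, x ≠ "" := by
  induction l with
  | nil => simp
  | cons a t ih =>
    by_cases ha : a = ""
    · subst ha
      rw [List.dropWhile_cons]
      simpa using ih
    · rw [List.dropWhile_cons]
      simp [ha]

theorem takeWhile_blank_rep (l : List String) :
    l.takeWhile (· == "") = List.replicate (l.takeWhile (· == "")).length "" := by
  induction l with
  | nil => simp
  | cons a t ih =>
    by_cases ha : a = ""
    · subst ha
      rw [List.takeWhile_cons]
      simp only [beq_self_eq_true, if_true, List.length_cons, List.replicate_succ]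
      exact congrArg _ ih
    · rw [List.takeWhile_cons]
      simp [ha]

theorem cslRuns_blank (mbl : Int) (rest : List String) :
    cslRuns mbl ("" :: rest)
      = List.replicate ((max 0 (min ((1 + (rest.takeWhile (· == "")).length : Nat) : Int) mbl)).toNat) ""
        ++ cslRuns mbl (rest.dropWhile (· == "")) := by
  rw [cslRuns, if_pos rfl]

theorem cslRuns_cons (mbl : Int) (s : String) (rest : List String) (h : s ≠ "") :
    cslRuns mbl (s :: rest) = s :: cslRuns mbl rest := by
  rw [cslRuns]
  simp [h]

theorem cslGoS_eq_runs (mbl : Int) (ss : List String) :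
    (cslGoS mbl [] 0 ss).1 = cslRuns mbl ss := by
  induction ss using cslRuns.induct with
  | case1 => simp [cslGoS, cslRuns]
  | case2 rest ih =>
    have hsplit : ("" :: rest : List String)
        = List.replicate ((rest.takeWhile (· == "")).length + 1) ""
          ++ rest.dropWhile (· == "") := by
      rw [List.replicate_succ, List.cons_append, ← takeWhile_blank_rep,
        List.takeWhile_append_dropWhile]
    conv_lhs => rw [hsplit]
    rw [cslGoS_append, cslGoS_blanks]
    rw [cslGoS_acc]
    dsimp only
    rw [cslGoS_reset mbl _ _ (dropWhile_head_ne rest), ih, cslRuns_blank]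
    have hc : (min (((rest.takeWhile (· == "")).length + 1 : Nat) : Int) (mbl - 0)).toNat
        = (max 0 (min ((1 + (rest.takeWhile (· == "")).length : Nat) : Int) mbl)).toNat := by
      omega
    rw [hc]
  | case3 line rest hne ih =>
    simp only [cslGoS, if_neg hne]
    rw [cslGoS_acc, ih, cslRuns_cons mbl line rest hne]
    simp

-- ===== VERDICT (by name: the statement is the Claim_ definition above) =====
theorem clean_source_lines_spec : Claim_equal_clean_source_lines := by
  intro lines mbl _
  unfold Spec_clean_source_lines clean_source_lines clean_source_lines_alt
  rw [cslGoA_eq_goS, cslGoS_acc, cslGoS_eq_runs]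
  simp
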